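-- pv_equiv track=rewrite | github.com/jdfalk/ghcommon | scripts/fix-markdown-headers.py | insert_header_after_special_comments
-- ===== SOURCE A (Python) =====
-- def insert_header_after_special_comments(content, header_lines):
--     """Insert header after any special comment blocks like doctoc."""
--     lines = content.split("\n")
--     insert_position = 0
--     in_doctoc = False
--
--     for i, line in enumerate(lines):
--         stripped = line.strip()
--
--         if stripped.startswith("<!-- START doctoc"):
--             in_doctoc = True
--             continue
--         if stripped.startswith("<!-- END doctoc"):
--             in_doctoc = False
--             insert_position = i + 1
--             break
--         if in_doctoc:
--             continue
--         if not stripped:  # Skip empty lines at the start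
--             if not in_doctoc:
--                 insert_position = i + 1
--             continue
--         # Found content, stop here if not in doctoc
--         if not in_doctoc:
--             insert_position = i
--             break
--
--     # Insert header at the determined position
--     before_lines = lines[:insert_position]
--     after_lines = lines[insert_position:]
--
--     # Add a blank line after header if needed
--     if after_lines and after_lines[0].strip() != "":
--         result_lines = before_lines + header_lines + [""] + after_lines
--     else:
--         result_lines = before_lines + header_lines + after_lines
--
--     return "\n".join(result_lines)
-- ===== SOURCE B (Python) =====
-- def insert_header_after_special_comments(content, header_lines):
--     """Insert header after any special comment blocks like doctoc."""
--     lines = content.split("\n")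
--     n = len(lines)
--     # Stage 1: index of the first non-blank line (n if all blank).
--     k = next((i for i, l in enumerate(lines) if l.strip() != ""), None)
--     # Stage 2: closed-form classification of that line decides the position.
--     if k is None:
--         pos = n
--     else:
--         first = lines[k].strip()
--         if first.startswith("<!-- END doctoc"):
--             pos = k + 1
--         elif first.startswith("<!-- START doctoc"):
--             e = next((j for j in range(k + 1, n)
--                       if lines[j].strip().startswith("<!-- END doctoc")), None)
--             pos = e + 1 if e is not None else k
--         else:
--             pos = k
--     # Stage 3: splice.
--     blank = [""] if pos < n and lines[pos].strip() != "" else []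
--     return "\n".join(lines[:pos] + header_lines + blank + lines[pos:])
-- ===== Notes on version B (the rewrite author's own statement) =====
-- stated objective: alternative
-- what changed: Replaces A's stateful single scan (in_doctoc flag, running insert_position) by a staged decomposition: find the first non-blank line, classify it in closed form (END line, START block with a separate search for its END, or ordinary content) to get the position directly, then splice.
import Mathlib
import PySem

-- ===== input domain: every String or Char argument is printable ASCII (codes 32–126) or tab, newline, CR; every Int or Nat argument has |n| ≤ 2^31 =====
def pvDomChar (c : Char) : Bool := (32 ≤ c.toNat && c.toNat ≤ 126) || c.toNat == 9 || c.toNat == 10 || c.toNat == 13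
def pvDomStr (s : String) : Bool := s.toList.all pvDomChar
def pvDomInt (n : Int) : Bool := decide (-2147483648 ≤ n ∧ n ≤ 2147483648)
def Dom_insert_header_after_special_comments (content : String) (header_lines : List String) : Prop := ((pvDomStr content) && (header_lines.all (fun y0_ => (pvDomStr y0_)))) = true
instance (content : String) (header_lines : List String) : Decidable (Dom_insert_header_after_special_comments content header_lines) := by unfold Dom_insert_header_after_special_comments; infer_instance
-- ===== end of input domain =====

-- B replaces A's stateful single scan by staged passes: find the first non-blank line,
-- classify it in closed form to obtain the position, then splice (objective: alternative).

-- ===== PORT A =====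
-- A's for-loop over enumerate(lines) with state (insert_position, in_doctoc); break → return.
def pvLoopA : List String → Nat → Nat → Bool → Nat
  | [], _, pos, _ => pos
  | l :: rest, i, pos, ind =>
    let s := PySem.Str.strip l
    if PySem.Str.startswith s "<!-- START doctoc" then pvLoopA rest (i + 1) pos true
    else if PySem.Str.startswith s "<!-- END doctoc" then i + 1
    else if ind then pvLoopA rest (i + 1) pos ind
    else if s = "" then pvLoopA rest (i + 1) (i + 1) ind
    else i

def insert_header_after_special_comments (content : String) (header_lines : List String) : String :=
  let lines := (PySem.Str.split? content "\n").getD []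
  let insert_position := pvLoopA lines 0 0 false
  let before_lines := PySem.List.slice lines none (some (insert_position : Int))
  let after_lines := PySem.List.slice lines (some (insert_position : Int)) none
  let result_lines :=
    match after_lines with
    | a :: _ =>
      if PySem.Str.strip a ≠ "" then before_lines ++ header_lines ++ [""] ++ after_lines
      else before_lines ++ header_lines ++ after_lines
    | [] => before_lines ++ header_lines ++ after_lines
  PySem.Str.join "\n" result_lines

-- ===== PORT B =====
-- Source B stage 1: next((i for i,l in enumerate(lines) if l.strip() != ""), None)
def pvFirstNonBlank : List String → Nat → Option Nat
  | [], _ => none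
  | l :: rest, i => if PySem.Str.strip l ≠ "" then some i else pvFirstNonBlank rest (i + 1)

-- Source B stage 2 search: next((j for j in range(k+1, n) if lines[j].strip().startswith(END)), None);
-- iterating j over range(k+1, n) with lines[j] is ported as a scan of lines.drop (k+1) carrying j.
def pvFindEnd : List String → Nat → Option Nat
  | [], _ => none
  | l :: rest, j =>
    if PySem.Str.startswith (PySem.Str.strip l) "<!-- END doctoc" then some j
    else pvFindEnd rest (j + 1)

def insert_header_after_special_comments_alt (content : String) (header_lines : List String) : String :=
  let lines := (PySem.Str.split? content "\n").getD []
  let n := lines.length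
  let pos :=
    match pvFirstNonBlank lines 0 with
    | none => n
    | some k =>
      let first := PySem.Str.strip (lines.getD k "")   -- lines[k]; k < n by construction
      if PySem.Str.startswith first "<!-- END doctoc" then k + 1
      else if PySem.Str.startswith first "<!-- START doctoc" then
        match pvFindEnd (lines.drop (k + 1)) (k + 1) with
        | some e => e + 1
        | none => k
      else k
  let blank := if pos < n ∧ PySem.Str.strip (lines.getD pos "") ≠ "" then [""] else []
  PySem.Str.join "\n"
    (PySem.List.slice lines none (some (pos : Int)) ++ header_lines ++ blank ++
      PySem.List.slice lines (some (pos : Int)) none)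

-- ===== PRECONDITION & SPEC =====
def Spec_insert_header_after_special_comments (content : String) (header_lines : List String) (out : String) : Prop := out = insert_header_after_special_comments_alt content header_lines
instance (content : String) (header_lines : List String) (out : String) : Decidable (Spec_insert_header_after_special_comments content header_lines out) := by unfold Spec_insert_header_after_special_comments; infer_instance

-- ===== CLAIM =====
def Claim_equal_insert_header_after_special_comments : Prop := ∀ (content : String) (header_lines : List String), Dom_insert_header_after_special_comments content header_lines → Spec_insert_header_after_special_comments content header_lines (insert_header_after_special_comments content header_lines)

-- ===== LEMMAS AND PROOFS =====

-- A line that starts with the START marker cannot also start with the END marker.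
theorem pv_start_not_end (s : String)
    (h : PySem.Str.startswith s "<!-- START doctoc" = true) :
    PySem.Str.startswith s "<!-- END doctoc" = false := by
  by_contra hc
  rw [Bool.not_eq_false] at hc
  simp only [PySem.Str.startswith_eq, PySem.Chars.startswith_iff] at h hc
  rcases List.prefix_or_prefix_of_prefix h hc with hp | hp
  · exact absurd hp (by decide)
  · exact absurd hp (by decide)

-- Blank-line helper facts used in the blank case below are proved inline by decide.

-- A's loop with in_doctoc = true is exactly the forward scan for the END marker.
theorem pvLoopA_true (l : List String) : ∀ (i pos : Nat),
    pvLoopA l i pos true = (match pvFindEnd l i with | some j => j + 1 | none => pos) := by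
  induction l with
  | nil => intro i pos; rfl
  | cons x rest ih =>
    intro i pos
    simp only [pvLoopA, pvFindEnd]
    by_cases hS : PySem.Str.startswith (PySem.Str.strip x) "<!-- START doctoc" = true
    · have hE := pv_start_not_end _ hS
      simp at hS hE
      simp [hS, hE, ih]
    · by_cases hE : PySem.Str.startswith (PySem.Str.strip x) "<!-- END doctoc" = true
      · simp at hS hE
        simp [hS, hE]
      · simp at hS hE
        simp [hS, hE, ih]

-- pvFirstNonBlank only returns indices ≥ its starting index.
theorem pvFirstNonBlank_ge (l : List String) : ∀ (i k : Nat),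
    pvFirstNonBlank l i = some k → i ≤ k := by
  induction l with
  | nil => intro i k h; simp [pvFirstNonBlank] at h
  | cons x rest ih =>
    intro i k h
    simp only [pvFirstNonBlank] at h
    split at h
    · simp at h; omega
    · have := ih (i + 1) k h; omega

-- Main invariant: A's loop (entered with pos = i, flag off) equals B's staged computation,
-- expressed relative to the remaining suffix l (absolute index k ↦ local index k - i).
theorem pvLoopA_eq_staged (l : List String) : ∀ (i : Nat),
    pvLoopA l i i false =
      (match pvFirstNonBlank l i with
       | none => i + l.length
       | some k =>
         let first := PySem.Str.strip (l.getD (k - i) "")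
         if PySem.Str.startswith first "<!-- END doctoc" then k + 1
         else if PySem.Str.startswith first "<!-- START doctoc" then
           match pvFindEnd (l.drop (k - i + 1)) (k + 1) with
           | some e => e + 1
           | none => k
         else k) := by
  induction l with
  | nil => intro i; simp [pvLoopA, pvFirstNonBlank]
  | cons x rest ih =>
    intro i
    by_cases hB : PySem.Str.strip x = ""
    · -- blank line: both sides step to the tail at index i+1
      have hS : ¬ (PySem.Str.startswith (PySem.Str.strip x) "<!-- START doctoc" = true) := by
        rw [hB]; decide
      have hE : ¬ (PySem.Str.startswith (PySem.Str.strip x) "<!-- END doctoc" = true) := by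
        rw [hB]; decide
      rw [show pvLoopA (x :: rest) i i false = pvLoopA rest (i + 1) (i + 1) false from by
        simp only [pvLoopA]
        rw [if_neg hS, if_neg hE, if_neg (by decide : ¬ (false = true)), if_pos hB]]
      rw [show pvFirstNonBlank (x :: rest) i = pvFirstNonBlank rest (i + 1) from by
        simp only [pvFirstNonBlank]
        rw [if_neg (by simp [hB])]]
      rw [ih (i + 1)]
      cases hF : pvFirstNonBlank rest (i + 1) with
      | none =>
        show i + 1 + rest.length = i + (x :: rest).length
        simp only [List.length_cons]
        omega
      | some k =>
        have hk := pvFirstNonBlank_ge rest (i + 1) k hF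
        have h1 : k - i = (k - (i + 1)) + 1 := by omega
        dsimp only
        rw [h1]
        simp only [List.getD_cons_succ, List.drop_succ_cons]
    · -- first non-blank line is x itself: classify it
      rw [show pvFirstNonBlank (x :: rest) i = some i from by
        simp only [pvFirstNonBlank]
        rw [if_pos hB]]
      dsimp only
      simp only [Nat.sub_self, List.getD_cons_zero, Nat.zero_add, List.drop_succ_cons,
        List.drop_zero]
      by_cases hS : PySem.Str.startswith (PySem.Str.strip x) "<!-- START doctoc" = true
      · have hE : ¬ (PySem.Str.startswith (PySem.Str.strip x) "<!-- END doctoc" = true) := by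
          rw [pv_start_not_end _ hS]; decide
        rw [show pvLoopA (x :: rest) i i false = pvLoopA rest (i + 1) i true from by
          simp only [pvLoopA]
          rw [if_pos hS]]
        rw [pvLoopA_true, if_neg hE, if_pos hS]
      · by_cases hE : PySem.Str.startswith (PySem.Str.strip x) "<!-- END doctoc" = true
        · rw [show pvLoopA (x :: rest) i i false = i + 1 from by
            simp only [pvLoopA]
            rw [if_neg hS, if_pos hE]]
          rw [if_pos hE]
        · rw [show pvLoopA (x :: rest) i i false = i from by
            simp only [pvLoopA]
            rw [if_neg hS, if_neg hE, if_neg (by decide : ¬ (false = true)), if_neg hB]]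
          rw [if_neg hE, if_neg hS]

-- The common splice stage: A's match on the tail equals B's guarded blank insertion.
theorem pv_splice (lines header_lines : List String) (pos : Nat) :
    (match PySem.List.slice lines (some (pos : Int)) none with
     | a :: _ =>
       if PySem.Str.strip a ≠ "" then
         PySem.List.slice lines none (some (pos : Int)) ++ header_lines ++ [""] ++
           PySem.List.slice lines (some (pos : Int)) none
       else
         PySem.List.slice lines none (some (pos : Int)) ++ header_lines ++
           PySem.List.slice lines (some (pos : Int)) none
     | [] =>
       PySem.List.slice lines none (some (pos : Int)) ++ header_lines ++
         PySem.List.slice lines (some (pos : Int)) none) =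
    PySem.List.slice lines none (some (pos : Int)) ++ header_lines ++
      (if pos < lines.length ∧ PySem.Str.strip (lines.getD pos "") ≠ "" then [""] else []) ++
      PySem.List.slice lines (some (pos : Int)) none := by
  rw [PySem.List.slice_from_natCast]
  cases hdrop : lines.drop pos with
  | nil =>
    have hge : ¬ pos < lines.length := by
      rw [List.drop_eq_nil_iff] at hdrop; omega
    simp [hge]
  | cons a restl =>
    have hlt : pos < lines.length := by
      by_contra h
      have h0 : lines.drop pos = [] := List.drop_eq_nil_iff.mpr (by omega)
      rw [h0] at hdrop
      exact absurd hdrop (by simp)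
    have h2 : lines[pos]? = some a := by rw [← List.head?_drop, hdrop]; rfl
    have hg : lines[pos]'hlt = a := by
      have h3 : lines[pos]? = some (lines[pos]'hlt) := List.getElem?_eq_getElem hlt
      rw [h2] at h3
      exact (Option.some.inj h3).symm
    by_cases hA : PySem.Str.strip a = ""
    · simp [hlt, hg, hA]
    · simp [hlt, hg, hA]

-- ===== VERDICT =====
theorem insert_header_after_special_comments_spec : Claim_equal_insert_header_after_special_comments := by
  intro content header_lines _
  unfold Spec_insert_header_after_special_comments
  unfold insert_header_after_special_comments insert_header_after_special_comments_alt
  dsimp only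
  have hpos := pvLoopA_eq_staged ((PySem.Str.split? content "\n").getD []) 0
  simp only [Nat.zero_add, Nat.sub_zero] at hpos
  rw [hpos]
  exact congrArg (PySem.Str.join "\n") (pv_splice _ _ _)
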